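-- pv_equiv track=rewrite | github.com/live2skull/TheLordOfAlgorithm | problems_boj/기타/9519.py | process
-- ===== SOURCE A (Python) =====
-- def process(inp):
--     line = list(map(lambda x: x, inp))
--
--     sz = len(line)
--     is_even = sz % 2 == 0
--
--     front = [0] * (sz - sz // 2)
--     back = [0] * (sz // 2)
--
--     cnt = 1
--
--     while True:
--         i = 0
--         for j in range(0, sz, 2):
--             front[i] = line[j]; i += 1
--
--         # range(sz - 2, 0, -2) # sz 홀수
--         # range(sz - 1, 0, -2) # sz 짝수
--         i = 0
--         for j in range(sz - 1, 0, -2) if is_even else range(sz - 2, 0, -2):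
--             back[i] = line[j]; i += 1
--
--         i = 0
--         for v in front:
--             line[i] = v; i += 1
--         for v in back:
--             line[i] = v; i += 1
--
--         if "".join(line) == inp:
--             return cnt
--
--         cnt += 1
-- ===== SOURCE B (Python) =====
-- def _gcd(a, b):
--     while b:
--         a, b = b, a % b
--     return a
--
--
-- def process(inp):
--     # One shuffle step moves the character at position src(i) to position i.
--     # Decompose that permutation into cycles (walking each cycle only from its
--     # smallest element, abandoning a walk as soon as a smaller index shows up)
--     # and return the lcm over cycles of the minimal rotation period of the
--     # characters along the cycle (the period divides the cycle length, so only
--     # divisors are tested).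
--     n = len(inp)
--     src = lambda i: 2 * i if 2 * i < n else 2 * (n - 1 - i) + 1
--     ans = 1
--     for i in range(n):
--         orbit = [i]
--         j = src(i)
--         rep = True
--         while j != i:
--             if j < i:
--                 rep = False
--                 break
--             orbit.append(j)
--             j = src(j)
--         if rep:
--             k = len(orbit)
--             cyc = [inp[p] for p in orbit]
--             d = next(d for d in range(1, k + 1)
--                      if k % d == 0 and all(cyc[(p + d) % k] == cyc[p] for p in range(k)))
--             ans = ans * d // _gcd(ans, d)
--     return ans
-- ===== Notes on version B (the rewrite author's own statement) =====
-- stated objective: faster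
-- what changed: Instead of repeatedly shuffling the whole string until it matches the original, B builds the fixed shuffle permutation's cycles once and returns the lcm over cycles of the minimal rotation period of the characters along each cycle (testing only divisors of the cycle length).
import Mathlib
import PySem

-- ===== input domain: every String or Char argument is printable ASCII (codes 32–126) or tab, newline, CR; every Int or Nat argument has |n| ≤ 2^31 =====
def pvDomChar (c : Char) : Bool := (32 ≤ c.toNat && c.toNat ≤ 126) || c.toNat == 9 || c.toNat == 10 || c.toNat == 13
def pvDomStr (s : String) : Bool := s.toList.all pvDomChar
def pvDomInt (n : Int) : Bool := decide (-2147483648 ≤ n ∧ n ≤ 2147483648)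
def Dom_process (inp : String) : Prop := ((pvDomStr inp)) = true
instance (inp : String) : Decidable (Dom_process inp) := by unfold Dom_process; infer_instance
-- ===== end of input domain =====

-- B replaces A's shuffle-until-match loop by a cycle decomposition of the fixed
-- shuffle permutation: the answer is the lcm over cycles of the minimal rotation
-- period of the characters along each cycle (objective: faster).


-- ===== PORT A =====
-- One iteration of A's while-loop body.  Python allocates `front`/`back` once
-- outside the loop but overwrites every cell of both on every iteration, so
-- rebuilding them from `List.replicate` each round yields the same lists.
-- `line[j]` is read with PySem.List.pyGetD (the index is always in range).
def aBody (sz : Nat) (isEven : Bool) (line : List Char) : List Char :=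
  let front := ((PySem.List.pyRange 0 (sz : Int) 2).foldl
      (fun (st : List Char × Nat) j => (st.1.set st.2 (PySem.List.pyGetD line j 'a'), st.2 + 1))
      (List.replicate (sz - sz / 2) 'a', 0)).1
  let back := ((if isEven then PySem.List.pyRange ((sz : Int) - 1) 0 (-2)
                else PySem.List.pyRange ((sz : Int) - 2) 0 (-2)).foldl
      (fun (st : List Char × Nat) j => (st.1.set st.2 (PySem.List.pyGetD line j 'a'), st.2 + 1))
      (List.replicate (sz / 2) 'a', 0)).1
  let st1 := front.foldl (fun (st : List Char × Nat) v => (st.1.set st.2 v, st.2 + 1)) (line, 0)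
  let st2 := back.foldl (fun (st : List Char × Nat) v => (st.1.set st.2 v, st.2 + 1)) st1
  st2.1

-- A's `while True` loop; fuel only makes the recursion structural (the proof
-- below shows `sz! + 1` steps always suffice, so the 0-fuel branch is unreachable).
-- `"".join(line) == inp` is the list comparison `line' = target`.
def aLoop (target : List Char) (sz : Nat) (isEven : Bool) :
    Nat → List Char → Nat → Int
  | 0, _, _ => 0
  | fuel + 1, line, cnt =>
    let line' := aBody sz isEven line
    if line' = target then (cnt : Int)
    else aLoop target sz isEven fuel line' (cnt + 1)

def process (inp : String) : Int :=
  let line := inp.toList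
  let sz := line.length
  aLoop line sz (sz % 2 == 0) (Nat.factorial sz + 1) line 1

-- ===== PORT B =====
-- Python's hand-written `_gcd` loop.
def bGcd (a b : Nat) : Nat :=
  if h : b = 0 then a else bGcd b (a % b)
termination_by b
decreasing_by exact Nat.mod_lt _ (Nat.pos_of_ne_zero h)

-- Source B's `src` lambda.
def bSrc (n i : Nat) : Nat := if 2 * i < n then 2 * i else 2 * (n - 1 - i) + 1

-- Source B's inner `while` walk: `some orbit` when the walk returns to i without
-- meeting a smaller index (rep = True), `none` otherwise (rep = False).  Fuel n
-- suffices (cycles have length ≤ n); the 0-fuel branch is unreachable.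
def bWalk (n i : Nat) : Nat → Nat → List Nat → Option (List Nat)
  | 0, _, _ => none
  | fuel + 1, j, orbit =>
    if j = i then some orbit
    else if j < i then none
    else bWalk n i fuel (bSrc n j) (orbit ++ [j])

-- body of Source B's `for i in range(n)` loop (indexing `cyc`/`inp` is always in
-- range, so Python's `cyc[...]`/`inp[p]` are `List.getD`; the `next(...)`
-- always finds a divisor, so `.getD 0` is never the fallback).
def bStep (l : List Char) (n ans i : Nat) : Nat :=
  match bWalk n i n (bSrc n i) [i] with
  | none => ans
  | some orbit =>
    let k := orbit.length
    let cyc := orbit.map (fun p => l.getD p 'a')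
    let d := (((List.range' 1 k).find? (fun d =>
        k % d == 0 &&
          (List.range k).all (fun p => cyc.getD ((p + d) % k) 'a' == cyc.getD p 'a'))).getD 0)
    ans * d / bGcd ans d

def process_alt (inp : String) : Int :=
  let l := inp.toList
  let n := l.length
  ((List.range n).foldl (bStep l n) 1 : Nat)

-- ===== PRECONDITION & SPEC =====
def Spec_process (inp : String) (out : Int) : Prop := out = process_alt inp
instance (inp : String) (out : Int) : Decidable (Spec_process inp out) := by unfold Spec_process; infer_instance

-- ===== CLAIM (what is proved, stated in full; the proofs are below) =====
def Claim_equal_process : Prop := ∀ (inp : String), Dom_process inp → Spec_process inp (process inp)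

-- ===== LEMMAS AND PROOFS =====

-- ---- basic facts about the shuffle index map ----
theorem bSrc_lt {n i : Nat} (h : i < n) : bSrc n i < n := by
  unfold bSrc; split <;> omega

theorem bSrc_inj {n i j : Nat} (hi : i < n) (hj : j < n)
    (h : bSrc n i = bSrc n j) : i = j := by
  unfold bSrc at h; split at h <;> split at h <;> omega

theorem iter_lt {n : Nat} (t : Nat) {i : Nat} (h : i < n) : (bSrc n)^[t] i < n := by
  induction t generalizing i with
  | zero => simpa using h
  | succ t ih => rw [Function.iterate_succ_apply]; exact ih (bSrc_lt h)

theorem iter_cancel {n : Nat} (t : Nat) {x y : Nat} (hx : x < n) (hy : y < n)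
    (h : (bSrc n)^[t] x = (bSrc n)^[t] y) : x = y := by
  induction t generalizing x y with
  | zero => simpa using h
  | succ t ih =>
    rw [Function.iterate_succ_apply, Function.iterate_succ_apply] at h
    exact bSrc_inj hx hy (ih (bSrc_lt hx) (bSrc_lt hy) h)

theorem exists_return {n i : Nat} (h : i < n) :
    ∃ k, 0 < k ∧ k ≤ n ∧ (bSrc n)^[k] i = i := by
  have key : ∀ a b : Nat, a < b → b ≤ n → (bSrc n)^[a] i = (bSrc n)^[b] i →
      ∃ k, 0 < k ∧ k ≤ n ∧ (bSrc n)^[k] i = i := by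
    intro a b hlt hb heq
    refine ⟨b - a, by omega, by omega, ?_⟩
    have hh : (bSrc n)^[a] ((bSrc n)^[b - a] i) = (bSrc n)^[a] i := by
      rw [← Function.iterate_add_apply, show a + (b - a) = b by omega]
      exact heq.symm
    exact iter_cancel a (iter_lt _ h) h hh
  have hg : ¬ Function.Injective
      (fun t : Fin (n + 1) => (⟨(bSrc n)^[t.1] i, iter_lt t.1 h⟩ : Fin n)) := by
    intro hinj
    have hc := Fintype.card_le_of_injective _ hinj
    simp only [Fintype.card_fin] at hc
    omega
  rw [Function.not_injective_iff] at hg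
  obtain ⟨a, b, hab, hne⟩ := hg
  have h2 : (bSrc n)^[a.1] i = (bSrc n)^[b.1] i := congrArg Fin.val hab
  rcases Nat.lt_trichotomy a.1 b.1 with hc | hc | hc
  · exact key a.1 b.1 hc (by omega) h2
  · exact absurd (Fin.ext hc) hne
  · exact key b.1 a.1 hc (by omega) h2.symm

-- ---- kOf: the minimal return time (cycle length), computably ----
def kOf (n i : Nat) : Nat :=
  (((List.range' 1 n).find? (fun k => (bSrc n)^[k] i == i)).getD 0)

-- first satisfying element of a range'
theorem find?_range'_eq (p : Nat → Bool) (s m : Nat) :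
    ∀ cnt, s ≤ m → m < s + cnt → p m = true →
    (∀ j, s ≤ j → j < m → p j = false) →
    (List.range' s cnt).find? p = some m := by
  intro cnt
  induction cnt generalizing s with
  | zero => intro h1 h2 _ _; omega
  | succ c ih =>
    intro h1 h2 h3 h4
    rw [List.range'_succ]
    by_cases hs : s = m
    · subst hs; rw [List.find?_cons_of_pos h3]
    · have hps : p s = false := h4 s le_rfl (by omega)
      rw [List.find?_cons_of_neg (by simp [hps])]
      exact ih (s + 1) (by omega) (by omega) h3 (fun j hj1 hj2 => h4 j (by omega) hj2)

theorem kOf_spec {n i : Nat} (h : i < n) :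
    0 < kOf n i ∧ kOf n i ≤ n ∧ (bSrc n)^[kOf n i] i = i ∧
      ∀ p, 0 < p → p < kOf n i → (bSrc n)^[p] i ≠ i := by
  obtain ⟨k0, hk0pos, hk0le, hk0ret⟩ := exists_return h
  have hex : ∃ k, 0 < k ∧ (bSrc n)^[k] i = i := ⟨k0, hk0pos, hk0ret⟩
  obtain ⟨hmpos, hmret⟩ := Nat.find_spec hex
  have hmle : Nat.find hex ≤ k0 := Nat.find_le ⟨hk0pos, hk0ret⟩
  have hmin : ∀ p, 0 < p → p < Nat.find hex → (bSrc n)^[p] i ≠ i := by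
    intro p hp1 hp2 hcon
    exact (Nat.find_min hex hp2) ⟨hp1, hcon⟩
  have hfind : (List.range' 1 n).find? (fun k => (bSrc n)^[k] i == i) = some (Nat.find hex) := by
    refine find?_range'_eq _ 1 (Nat.find hex) n (by omega) (by omega) (by simp [hmret]) ?_
    intro j hj1 hj2
    simp only [beq_eq_false_iff_ne, ne_eq]
    exact hmin j (by omega) hj2
  have hk : kOf n i = Nat.find hex := by unfold kOf; rw [hfind]; rfl
  rw [hk]
  exact ⟨hmpos, by omega, hmret, hmin⟩

theorem iter_mul_ret {n i : Nat} (hret : (bSrc n)^[kOf n i] i = i) :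
    ∀ m, (bSrc n)^[kOf n i * m] i = i := by
  intro m
  induction m with
  | zero => simp
  | succ m ih => rw [Nat.mul_succ, Function.iterate_add_apply, hret, ih]

theorem iter_mod {n i : Nat} (h : i < n) (p : Nat) :
    (bSrc n)^[p] i = (bSrc n)^[p % kOf n i] i := by
  obtain ⟨hpos, hle, hret, hmin⟩ := kOf_spec h
  conv_lhs => rw [← Nat.mod_add_div p (kOf n i)]
  rw [Function.iterate_add_apply, iter_mul_ret hret]

-- ---- the walk ----
def orbitL (n k i : Nat) : List Nat := (List.range k).map (fun p => (bSrc n)^[p] i)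

def repB (n i : Nat) : Bool := decide (∀ p < kOf n i, i ≤ (bSrc n)^[p] i)

theorem orbitL_snoc (n c i : Nat) :
    orbitL n c i ++ [(bSrc n)^[c] i] = orbitL n (c + 1) i := by
  unfold orbitL; rw [List.range_succ, List.map_append]; rfl

theorem bWalk_rep {n i : Nat} (h : i < n) (hrep : repB n i = true) :
    bWalk n i n (bSrc n i) [i] = some (orbitL n (kOf n i) i) := by
  obtain ⟨hpos, hle, hret, hmin⟩ := kOf_spec h
  have hr : ∀ p < kOf n i, i ≤ (bSrc n)^[p] i := by
    simpa [repB] using hrep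
  have aux : ∀ fuel c, 0 < c → c ≤ kOf n i → kOf n i - c < fuel →
      bWalk n i fuel ((bSrc n)^[c] i) (orbitL n c i) = some (orbitL n (kOf n i) i) := by
    intro fuel
    induction fuel with
    | zero => intro c h1 h2 h3; omega
    | succ fuel ih =>
      intro c h1 h2 h3
      by_cases hc : c = kOf n i
      · subst hc
        rw [bWalk, if_pos hret]
      · have hne : (bSrc n)^[c] i ≠ i := hmin c h1 (by omega)
        have hge : i ≤ (bSrc n)^[c] i := hr c (by omega)
        rw [bWalk, if_neg hne, if_neg (by omega),
          show bSrc n ((bSrc n)^[c] i) = (bSrc n)^[c + 1] i from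
            (Function.iterate_succ_apply' (bSrc n) c i).symm,
          orbitL_snoc]
        exact ih (c + 1) (by omega) (by omega) (by omega)
  have h1 : (bSrc n)^[1] i = bSrc n i := by simp
  have h0 : orbitL n 1 i = [i] := by simp [orbitL]
  have := aux n 1 (by omega) (by omega) (by omega)
  rwa [h1, h0] at this

theorem bWalk_notrep {n i : Nat} (h : i < n) (hrep : repB n i = false) :
    bWalk n i n (bSrc n i) [i] = none := by
  obtain ⟨hpos, hle, hret, hmin⟩ := kOf_spec h
  have hnot : ¬ ∀ p < kOf n i, i ≤ (bSrc n)^[p] i := by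
    unfold repB at hrep; exact of_decide_eq_false hrep
  push_neg at hnot
  obtain ⟨pw, hpwk, hpwlt⟩ := hnot
  have hex' : ∃ p, (bSrc n)^[p] i < i := ⟨pw, hpwlt⟩
  have hp0 : (bSrc n)^[Nat.find hex'] i < i := Nat.find_spec hex'
  have hminp : ∀ q, q < Nat.find hex' → ¬ (bSrc n)^[q] i < i :=
    fun q hq => Nat.find_min hex' hq
  have hp0k : Nat.find hex' < kOf n i := Nat.lt_of_le_of_lt (Nat.find_le hpwlt) hpwk
  have hpos0 : 0 < Nat.find hex' := by
    rcases Nat.eq_zero_or_pos (Nat.find hex') with h0 | h0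
    · rw [h0] at hp0; simp at hp0
    · exact h0
  have aux : ∀ fuel c, 0 < c → c ≤ Nat.find hex' → Nat.find hex' - c < fuel →
      bWalk n i fuel ((bSrc n)^[c] i) (orbitL n c i) = none := by
    intro fuel
    induction fuel with
    | zero => intro c h1 h2 h3; omega
    | succ fuel ih =>
      intro c h1 h2 h3
      by_cases hc : c = Nat.find hex'
      · subst hc
        rw [bWalk, if_neg (by omega), if_pos hp0]
      · have hlt : ¬ (bSrc n)^[c] i < i := hminp c (by omega)
        have hne : (bSrc n)^[c] i ≠ i := hmin c h1 (by omega)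
        rw [bWalk, if_neg hne, if_neg hlt,
          show bSrc n ((bSrc n)^[c] i) = (bSrc n)^[c + 1] i from
            (Function.iterate_succ_apply' (bSrc n) c i).symm,
          orbitL_snoc]
        exact ih (c + 1) (by omega) (by omega) (by omega)
  have h1 : (bSrc n)^[1] i = bSrc n i := by simp
  have h0 : orbitL n 1 i = [i] := by simp [orbitL]
  have := aux n 1 (by omega) (by omega) (by omega)
  rwa [h1, h0] at this

-- ---- periods of the characters along a cycle ----
def isPer (l : List Char) (n i d : Nat) : Prop :=
  ∀ p : Nat, l.getD ((bSrc n)^[p + d] i) 'a' = l.getD ((bSrc n)^[p] i) 'a'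

def isPerB (l : List Char) (n i d : Nat) : Bool :=
  decide (∀ p < kOf n i,
    l.getD ((bSrc n)^[(p + d) % kOf n i] i) 'a' = l.getD ((bSrc n)^[p] i) 'a')

def dOf (l : List Char) (n i : Nat) : Nat :=
  (((List.range' 1 (kOf n i)).find? (isPerB l n i)).getD 0)

theorem add_mod_left_arg {p d k : Nat} : (p + d) % k = (p % k + d) % k := by
  conv_lhs => rw [← Nat.mod_add_div p k]
  rw [Nat.add_right_comm]
  exact Nat.add_mul_mod_self_left _ _ _

theorem isPerB_iff {l : List Char} {n i : Nat} (h : i < n) (d : Nat) :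
    isPerB l n i d = true ↔ isPer l n i d := by
  obtain ⟨hpos, hle, hret, hmin⟩ := kOf_spec h
  unfold isPerB isPer
  rw [decide_eq_true_eq]
  constructor
  · intro hb p
    have h1 : (bSrc n)^[p + d] i = (bSrc n)^[(p % kOf n i + d) % kOf n i] i := by
      rw [iter_mod h (p + d), add_mod_left_arg]
    rw [h1, hb (p % kOf n i) (Nat.mod_lt _ hpos), ← iter_mod h p]
  · intro hs p _
    rw [← iter_mod h (p + d)]
    exact hs p

theorem isPer_add {l : List Char} {n i d e : Nat}
    (hd : isPer l n i d) (he : isPer l n i e) : isPer l n i (d + e) := by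
  intro p
  rw [show p + (d + e) = (p + e) + d by omega, hd (p + e)]
  exact he p

theorem isPer_mul {l : List Char} {n i d : Nat} (hd : isPer l n i d) :
    ∀ m, isPer l n i (m * d) := by
  intro m
  induction m with
  | zero => intro p; simp
  | succ m ih =>
    rw [show (m + 1) * d = m * d + d by ring]
    exact isPer_add ih hd

theorem isPer_sub {l : List Char} {n i d e : Nat} (hd : isPer l n i d)
    (he : isPer l n i e) : isPer l n i (e - d) := by
  intro p
  have h1 := hd (p + (e - d))
  by_cases hde : d ≤ e
  · rw [show p + (e - d) + d = p + e by omega] at h1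
    rw [← h1]
    exact he p
  · rw [show e - d = 0 by omega]
    simp
theorem isPer_k {l : List Char} {n i : Nat} (h : i < n) : isPer l n i (kOf n i) := by
  obtain ⟨-, -, hret, -⟩ := kOf_spec h
  intro p
  rw [Function.iterate_add_apply, hret]

theorem dOf_spec {l : List Char} {n i : Nat} (h : i < n) :
    0 < dOf l n i ∧ dOf l n i ≤ kOf n i ∧ isPer l n i (dOf l n i) ∧
      ∀ d, 0 < d → d < dOf l n i → ¬ isPer l n i d := by
  obtain ⟨hpos, hle, hret, hmin⟩ := kOf_spec h
  have hkper : isPerB l n i (kOf n i) = true := (isPerB_iff h _).mpr (isPer_k h)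
  have hex : ∃ d, 0 < d ∧ isPerB l n i d = true := ⟨kOf n i, hpos, hkper⟩
  obtain ⟨hmpos, hmper⟩ := Nat.find_spec hex
  have hmle : Nat.find hex ≤ kOf n i := Nat.find_le ⟨hpos, hkper⟩
  have hfind : (List.range' 1 (kOf n i)).find? (isPerB l n i) = some (Nat.find hex) := by
    refine find?_range'_eq _ 1 (Nat.find hex) (kOf n i) (by omega) (by omega) hmper ?_
    intro j hj1 hj2
    by_cases hj : isPerB l n i j = true
    · exact absurd ⟨by omega, hj⟩ (Nat.find_min hex hj2)
    · exact eq_false_of_ne_true hj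
  have hdm : dOf l n i = Nat.find hex := by unfold dOf; rw [hfind]; rfl
  rw [hdm]
  refine ⟨hmpos, by omega, (isPerB_iff h _).mp hmper, ?_⟩
  intro d h1 h2 hcon
  exact Nat.find_min hex h2 ⟨h1, (isPerB_iff h d).mpr hcon⟩

theorem dOf_dvd {l : List Char} {n i : Nat} (h : i < n) {e : Nat}
    (he : isPer l n i e) : dOf l n i ∣ e := by
  obtain ⟨hdpos, hdle, hdper, hdmin⟩ := dOf_spec (l := l) h
  have hmd := Nat.mod_add_div e (dOf l n i)
  have h1 : isPer l n i (dOf l n i * (e / dOf l n i)) := by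
    have := isPer_mul hdper (e / dOf l n i)
    rwa [Nat.mul_comm] at this
  have hr : isPer l n i (e % dOf l n i) := by
    have := isPer_sub h1 he
    rwa [show e - dOf l n i * (e / dOf l n i) = e % dOf l n i by omega] at this
  by_cases hz : e % dOf l n i = 0
  · exact Nat.dvd_of_mod_eq_zero hz
  · exact absurd hr (hdmin _ (Nat.pos_of_ne_zero hz) (Nat.mod_lt _ hdpos))

theorem isPer_of_dvd {l : List Char} {n i e : Nat} (h : i < n)
    (hdvd : dOf l n i ∣ e) : isPer l n i e := by
  obtain ⟨-, -, hdper, -⟩ := dOf_spec (l := l) h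
  obtain ⟨c, rfl⟩ := hdvd
  have := isPer_mul hdper c
  rwa [Nat.mul_comm] at this

-- ---- every point lies on the orbit of a representative ----
theorem exists_rep {n j : Nat} (hj : j < n) :
    ∃ r p, r < n ∧ repB n r = true ∧ (bSrc n)^[p] r = j := by
  obtain ⟨hpos, hle, hret, hmin⟩ := kOf_spec hj
  have hex : ∃ v, ∃ q, q < kOf n j ∧ (bSrc n)^[q] j = v := ⟨j, 0, hpos, rfl⟩
  obtain ⟨q, hqk, hqr⟩ := Nat.find_spec hex
  have hrmin : ∀ v, v < Nat.find hex → ∀ q', q' < kOf n j → (bSrc n)^[q'] j ≠ v := by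
    intro v hv q' hq' hcon
    exact Nat.find_min hex hv ⟨q', hq', hcon⟩
  have hrn : Nat.find hex < n := hqr ▸ iter_lt q hj
  have hretr : (bSrc n)^[kOf n j] (Nat.find hex) = Nat.find hex := by
    rw [← hqr, ← Function.iterate_add_apply, show kOf n j + q = q + kOf n j by omega,
      Function.iterate_add_apply, hret]
  have hminr : ∀ m, 0 < m → m < kOf n j → (bSrc n)^[m] (Nat.find hex) ≠ Nat.find hex := by
    intro m h1 h2 hcon
    rw [← hqr, ← Function.iterate_add_apply, show m + q = q + m by omega,
      Function.iterate_add_apply] at hcon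
    exact hmin m h1 h2 (iter_cancel q (iter_lt m hj) hj hcon)
  have hkr : kOf n (Nat.find hex) = kOf n j := by
    obtain ⟨hpr, hler, hretr', hminr'⟩ := kOf_spec hrn
    rcases Nat.lt_trichotomy (kOf n (Nat.find hex)) (kOf n j) with hlt | heq | hgt
    · exact absurd hretr' (hminr _ hpr hlt)
    · exact heq
    · exact absurd hretr (hminr' (kOf n j) hpos hgt)
  have hrepr : repB n (Nat.find hex) = true := by
    unfold repB
    rw [decide_eq_true_eq]
    intro p hp
    rw [hkr] at hp
    by_contra hcon
    push_neg at hcon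
    have hval : (bSrc n)^[(p + q) % kOf n j] j = (bSrc n)^[p] (Nat.find hex) := by
      rw [← iter_mod hj, Function.iterate_add_apply, hqr]
    exact hrmin _ hcon _ (Nat.mod_lt _ hpos) hval
  refine ⟨Nat.find hex, kOf n j - q, hrn, hrepr, ?_⟩
  rw [← hqr, ← Function.iterate_add_apply, show kOf n j - q + q = kOf n j by omega, hret]

-- ---- the global return condition and its reduction to representatives ----
def PCond (l : List Char) (n t : Nat) : Prop :=
  ∀ j < n, l.getD ((bSrc n)^[t] j) 'a' = l.getD j 'a'

theorem PCond_isPer {l : List Char} {n t : Nat} (hP : PCond l n t) :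
    ∀ i < n, isPer l n i t := by
  intro i hi p
  rw [show p + t = t + p by omega, Function.iterate_add_apply]
  exact hP _ (iter_lt p hi)

theorem PCond_of_reps {l : List Char} {n t : Nat}
    (h : ∀ r < n, repB n r = true → isPer l n r t) : PCond l n t := by
  intro j hj
  obtain ⟨r, p, hrn, hrep, hpr⟩ := exists_rep hj
  have h1 := h r hrn hrep p
  rwa [show p + t = t + p by omega, Function.iterate_add_apply, hpr] at h1

-- ---- the folded lcm ----
def gFold (l : List Char) (n : Nat) : Nat :=
  (List.range n).foldl
    (fun ans i => if repB n i then Nat.lcm ans (dOf l n i) else ans) 1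

theorem foldG_acc_dvd (l : List Char) (n : Nat) :
    ∀ (xs : List Nat) (a : Nat),
      a ∣ xs.foldl (fun ans i => if repB n i then Nat.lcm ans (dOf l n i) else ans) a := by
  intro xs
  induction xs with
  | nil => intro a; simp
  | cons x xs ih =>
    intro a
    simp only [List.foldl_cons]
    refine Dvd.dvd.trans ?_ (ih _)
    by_cases hx : repB n x
    · rw [if_pos hx]; exact Nat.dvd_lcm_left _ _
    · rw [if_neg hx]

theorem foldG_elem_dvd (l : List Char) (n : Nat) :
    ∀ (xs : List Nat) (a : Nat) (i : Nat), i ∈ xs → repB n i = true →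
      dOf l n i ∣ xs.foldl (fun ans i => if repB n i then Nat.lcm ans (dOf l n i) else ans) a := by
  intro xs
  induction xs with
  | nil => intro a i hi; simp at hi
  | cons x xs ih =>
    intro a i hi hrep
    simp only [List.foldl_cons]
    rcases List.mem_cons.mp hi with rfl | hmem
    · refine Dvd.dvd.trans ?_ (foldG_acc_dvd l n xs _)
      rw [if_pos hrep]
      exact Nat.dvd_lcm_right _ _
    · exact ih _ i hmem hrep

theorem foldG_dvd_of (l : List Char) (n : Nat) :
    ∀ (xs : List Nat) (a t : Nat), a ∣ t →
      (∀ i ∈ xs, repB n i = true → dOf l n i ∣ t) →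
      xs.foldl (fun ans i => if repB n i then Nat.lcm ans (dOf l n i) else ans) a ∣ t := by
  intro xs
  induction xs with
  | nil => intro a t ha _; simpa using ha
  | cons x xs ih =>
    intro a t ha h
    simp only [List.foldl_cons]
    refine ih _ t ?_ (fun i hi hr => h i (List.mem_cons_of_mem _ hi) hr)
    by_cases hx : repB n x
    · rw [if_pos hx]
      exact Nat.lcm_dvd ha (h x List.mem_cons_self hx)
    · rwa [if_neg hx]

theorem foldG_pos (l : List Char) (n : Nat) :
    ∀ (xs : List Nat) (a : Nat), 0 < a → (∀ i ∈ xs, i < n) →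
      0 < xs.foldl (fun ans i => if repB n i then Nat.lcm ans (dOf l n i) else ans) a := by
  intro xs
  induction xs with
  | nil => intro a ha _; simpa using ha
  | cons x xs ih =>
    intro a ha h
    simp only [List.foldl_cons]
    refine ih _ ?_ (fun i hi => h i (List.mem_cons_of_mem _ hi))
    by_cases hx : repB n x
    · rw [if_pos hx]
      exact Nat.lcm_pos ha (dOf_spec (l := l) (h x List.mem_cons_self)).1
    · rwa [if_neg hx]

theorem gFold_pos (l : List Char) (n : Nat) : 0 < gFold l n :=
  foldG_pos l n _ 1 (by omega) (fun i hi => List.mem_range.mp hi)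

theorem gFold_dvd_factorial (l : List Char) (n : Nat) :
    gFold l n ∣ Nat.factorial n := by
  refine foldG_dvd_of l n _ 1 _ (one_dvd _) ?_
  intro i hi hrep
  have hin : i < n := List.mem_range.mp hi
  obtain ⟨hkpos, hkle, -, -⟩ := kOf_spec hin
  exact (dOf_dvd hin (isPer_k hin)).trans (Nat.dvd_factorial hkpos hkle)

theorem PCond_gFold (l : List Char) (n : Nat) : PCond l n (gFold l n) := by
  refine PCond_of_reps ?_
  intro r hrn hrep
  exact isPer_of_dvd hrn (foldG_elem_dvd l n _ 1 r (List.mem_range.mpr hrn) hrep)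

theorem gFold_min {l : List Char} {n t : Nat} (hP : PCond l n t) :
    gFold l n ∣ t := by
  refine foldG_dvd_of l n _ 1 _ (one_dvd _) ?_
  intro i hi hrep
  exact dOf_dvd (List.mem_range.mp hi) (PCond_isPer hP i (List.mem_range.mp hi))

-- ---- A's loop body is one application of the permutation step ----
theorem foldl_set_write {α : Type} (g : α → Char) :
    ∀ (js : List α) (arr : List Char) (i0 : Nat), i0 + js.length ≤ arr.length →
    js.foldl (fun (st : List Char × Nat) j => (st.1.set st.2 (g j), st.2 + 1)) (arr, i0) =
      (arr.take i0 ++ js.map g ++ arr.drop (i0 + js.length), i0 + js.length) := by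
  intro js
  induction js with
  | nil =>
    intro arr i0 h
    simp
  | cons j js ih =>
    intro arr i0 h
    simp only [List.length_cons] at h ⊢
    simp only [List.foldl_cons]
    rw [ih (arr.set i0 (g j)) (i0 + 1) (by rw [List.length_set]; omega)]
    have hi0 : i0 < arr.length := by omega
    refine congrArg₂ Prod.mk ?_ (by omega)
    have hdrop : (arr.set i0 (g j)).drop (i0 + 1 + js.length) = arr.drop (i0 + 1 + js.length) := by
      rw [List.drop_set, if_pos (by omega)]
    have htake : (arr.set i0 (g j)).take (i0 + 1) = arr.take i0 ++ [g j] := by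
      refine List.ext_getElem (by simp [List.length_take, List.length_set]; omega) ?_
      intro t h1 h2
      rw [List.length_take, List.length_set] at h1
      simp only [List.getElem_take, List.getElem_set, List.getElem_append,
        List.length_take]
      split_ifs <;> first | rfl | (exfalso; omega) | (simp only [List.getElem_singleton])
    rw [htake, hdrop, show i0 + (js.length + 1) = i0 + 1 + js.length from by omega]
    simp [List.append_assoc]

theorem foldl_set_write_id :
    ∀ (vs : List Char) (arr : List Char) (i0 : Nat), i0 + vs.length ≤ arr.length →
    vs.foldl (fun (st : List Char × Nat) v => (st.1.set st.2 v, st.2 + 1)) (arr, i0) =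
      (arr.take i0 ++ vs ++ arr.drop (i0 + vs.length), i0 + vs.length) := by
  intro vs arr i0 h
  have := foldl_set_write (fun c : Char => c) vs arr i0 h
  simpa using this

def stepP (l : List Char) : List Char :=
  (List.range l.length).map (fun q => l.getD (bSrc l.length q) 'a')

theorem stepP_getD (y : List Char) (q : Nat) (hq : q < y.length) :
    (stepP y).getD q 'a' = y.getD (bSrc y.length q) 'a' := by
  unfold stepP
  exact PySem.List.getD_map_range _ _ _ _ hq

theorem pyRange_front (n : Nat) :
    PySem.List.pyRange 0 (n : Int) 2
      = (List.range (n - n / 2)).map (fun k => ((2 * k : Nat) : Int)) := by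
  rw [PySem.List.pyRange_of_pos 0 (n : Int) (by norm_num)]
  rw [show (if (0:Int) < (n:Int) then (((n:Int) - 0 + 2 - 1) / 2).toNat else 0) = n - n / 2
    from by split <;> omega]
  refine List.map_congr_left ?_
  intro k _
  push_cast
  ring

-- `pyRange a 0 (-2)` unfolded (definitional equality).
theorem pyRange_negtwo (a : Int) :
    PySem.List.pyRange a 0 (-2)
      = List.map (fun (k : Nat) => a + (-2) * (k : Int))
          (List.range (if (0:Int) < a then ((a - 0 + 2 - 1) / 2).toNat else 0)) := rfl

theorem aBody_eq_stepP {n : Nat} (line : List Char) (h : line.length = n) :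
    aBody n (n % 2 == 0) line = stepP line := by
  subst h
  set n := line.length with hn
  have hfront :
      ((PySem.List.pyRange 0 (n : Int) 2).foldl
        (fun (st : List Char × Nat) j => (st.1.set st.2 (PySem.List.pyGetD line j 'a'), st.2 + 1))
        (List.replicate (n - n / 2) 'a', 0)).1
      = (List.range (n - n / 2)).map (fun p => line.getD (bSrc n p) 'a') := by
    rw [pyRange_front n,
      foldl_set_write (fun j => PySem.List.pyGetD line j 'a')
        ((List.range (n - n / 2)).map (fun k => ((2 * k : Nat) : Int)))
        (List.replicate (n - n / 2) 'a') 0 (by simp)]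
    simp only [List.take_zero, List.nil_append, Nat.zero_add, List.length_map,
      List.length_range, List.map_map]
    rw [List.drop_eq_nil_of_le (by simp), List.append_nil]
    refine List.map_congr_left ?_
    intro p hp
    have hp' : p < n - n / 2 := List.mem_range.mp hp
    have hb : bSrc n p = 2 * p := by unfold bSrc; rw [if_pos (by omega)]
    simp only [Function.comp_apply]
    rw [hb]
    exact PySem.List.pyGetD_natCast line (2 * p) 'a'
  have hback :
      ((if ((n % 2 == 0 : Bool)) then PySem.List.pyRange ((n : Int) - 1) 0 (-2)
        else PySem.List.pyRange ((n : Int) - 2) 0 (-2)).foldl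
        (fun (st : List Char × Nat) j => (st.1.set st.2 (PySem.List.pyGetD line j 'a'), st.2 + 1))
        (List.replicate (n / 2) 'a', 0)).1
      = (List.range (n / 2)).map (fun p => line.getD (bSrc n (n - n / 2 + p)) 'a') := by
    by_cases hpar : n % 2 = 0
    · rw [if_pos (show (n % 2 == 0) = true by simp [hpar]), pyRange_negtwo,
        show (if (0:Int) < (n:Int) - 1 then (((n:Int) - 1 - 0 + 2 - 1) / 2).toNat else 0) = n / 2
          from by split <;> omega,
        foldl_set_write (fun j => PySem.List.pyGetD line j 'a') _ _ 0 (by simp)]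
      simp only [List.take_zero, List.nil_append, Nat.zero_add, List.length_map,
        List.length_range, List.map_map]
      rw [List.drop_eq_nil_of_le (by simp), List.append_nil]
      refine List.map_congr_left ?_
      intro k hk
      have hk' : k < n / 2 := List.mem_range.mp hk
      have hb : bSrc n (n - n / 2 + k) = n - 1 - 2 * k := by
        unfold bSrc; rw [if_neg (by omega)]; omega
      have harg : (n : Int) - 1 + (-2) * (k : Int) = ((n - 1 - 2 * k : Nat) : Int) := by omega
      simp only [Function.comp_apply]
      rw [hb, harg]
      exact PySem.List.pyGetD_natCast line (n - 1 - 2 * k) 'a'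
    · rw [if_neg (show ¬ (n % 2 == 0) = true by simp [hpar]), pyRange_negtwo,
        show (if (0:Int) < (n:Int) - 2 then (((n:Int) - 2 - 0 + 2 - 1) / 2).toNat else 0) = n / 2
          from by split <;> omega,
        foldl_set_write (fun j => PySem.List.pyGetD line j 'a') _ _ 0 (by simp)]
      simp only [List.take_zero, List.nil_append, Nat.zero_add, List.length_map,
        List.length_range, List.map_map]
      rw [List.drop_eq_nil_of_le (by simp), List.append_nil]
      refine List.map_congr_left ?_
      intro k hk
      have hk' : k < n / 2 := List.mem_range.mp hk
      have hb : bSrc n (n - n / 2 + k) = n - 2 - 2 * k := by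
        unfold bSrc; rw [if_neg (by omega)]; omega
      have harg : (n : Int) - 2 + (-2) * (k : Int) = ((n - 2 - 2 * k : Nat) : Int) := by omega
      simp only [Function.comp_apply]
      rw [hb, harg]
      exact PySem.List.pyGetD_natCast line (n - 2 - 2 * k) 'a'
  simp only [aBody]
  rw [hfront, hback]
  rw [foldl_set_write_id ((List.range (n - n / 2)).map (fun p => line.getD (bSrc n p) 'a'))
    line 0 (by simp only [List.length_map, List.length_range, Nat.zero_add]; omega)]
  simp only [List.take_zero, List.nil_append, Nat.zero_add, List.length_map, List.length_range]
  rw [foldl_set_write_id ((List.range (n / 2)).map (fun p => line.getD (bSrc n (n - n / 2 + p)) 'a'))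
    _ _ (by simp only [List.length_map, List.length_range, List.length_append, List.length_drop]; omega)]
  simp only [List.length_map, List.length_range]
  rw [List.take_left' (by simp), List.drop_eq_nil_of_le
    (by simp only [List.length_append, List.length_map, List.length_range, List.length_drop]; omega),
    List.append_nil]
  have h1 : List.range n = List.range (n - n / 2) ++ (List.range (n / 2)).map (fun x => (n - n / 2) + x) := by
    have h2 := List.range_add (n := n - n / 2) (m := n / 2)
    rwa [show n - n / 2 + n / 2 = n from by omega] at h2
  show _ = stepP line
  unfold stepP
  rw [← hn, h1, List.map_append, List.map_map]
  rfl

theorem stepP_length (l : List Char) : (stepP l).length = l.length := by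
  simp [stepP]

theorem stepP_iterate_getD (l : List Char) (t : Nat) :
    ((stepP^[t] l).length = l.length) ∧
    ∀ q < l.length, (stepP^[t] l).getD q 'a' = l.getD ((bSrc l.length)^[t] q) 'a' := by
  induction t with
  | zero => simp
  | succ t ih =>
    obtain ⟨ihl, ihg⟩ := ih
    rw [Function.iterate_succ_apply']
    refine ⟨by rw [stepP_length, ihl], ?_⟩
    intro q hq
    rw [stepP_getD _ q (by omega), ihl, ihg (bSrc l.length q) (bSrc_lt hq),
      ← Function.iterate_succ_apply (bSrc l.length) t q]

theorem stepP_iterate_eq_iff (l : List Char) (t : Nat) :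
    stepP^[t] l = l ↔ PCond l l.length t := by
  obtain ⟨hl, hg⟩ := stepP_iterate_getD l t
  constructor
  · intro heq j hj
    rw [← hg j hj, heq]
  · intro hP
    refine List.ext_getElem (by omega) ?_
    intro q h1 h2
    rw [← List.getD_eq_getElem _ 'a' h1, ← List.getD_eq_getElem _ 'a' h2,
      hg q (by omega), hP q (by omega)]

theorem aLoop_eq {l : List Char} {T : Nat}
    (hP : stepP^[T] l = l) (hmin : ∀ t, 0 < t → t < T → stepP^[t] l ≠ l) :
    ∀ fuel c, 0 < c → c ≤ T → T - c < fuel →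
      aLoop l l.length (l.length % 2 == 0) fuel (stepP^[c - 1] l) c = (T : Int) := by
  intro fuel
  induction fuel with
  | zero => intro c h1 h2 h3; omega
  | succ fuel ih =>
    intro c h1 h2 h3
    have hlen : (stepP^[c - 1] l).length = l.length := (stepP_iterate_getD l (c - 1)).1
    have hbody : aBody l.length (l.length % 2 == 0) (stepP^[c - 1] l) = stepP (stepP^[c - 1] l) := by
      rw [← hlen]
      exact aBody_eq_stepP _ rfl
    simp only [aLoop]
    rw [hbody, ← Function.iterate_succ_apply' stepP (c - 1) l,
      show (c - 1).succ = c from by omega]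
    by_cases hc : stepP^[c] l = l
    · rw [if_pos hc]
      have : c = T := by
        by_contra hne
        exact hmin c h1 (by omega) hc
      rw [this]
    · rw [if_neg hc]
      have hcT : c < T := by
        rcases Nat.lt_or_ge c T with hlt | hge
        · exact hlt
        · exact absurd ((show c = T by omega) ▸ hP) hc
      have := ih (c + 1) (by omega) (by omega) (by omega)
      rwa [show c + 1 - 1 = c by omega] at this

-- ---- B computes gFold ----
theorem bGcd_eq_gcd : ∀ b a, bGcd a b = Nat.gcd a b := by
  intro b
  induction b using Nat.strong_induction_on with
  | _ b ih =>
    intro a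
    unfold bGcd
    by_cases hb : b = 0
    · simp [hb]
    · rw [dif_neg hb, ih _ (Nat.mod_lt _ (Nat.pos_of_ne_zero hb)) b,
        Nat.gcd_comm b (a % b), ← Nat.gcd_rec b a, Nat.gcd_comm b a]

theorem bStep_eq {l : List Char} {n : Nat} (ans i : Nat) (hin : i < n) :
    bStep l n ans i = if repB n i then Nat.lcm ans (dOf l n i) else ans := by
  obtain ⟨hkpos, hkle, hkret, hkmin⟩ := kOf_spec hin
  obtain ⟨hdpos, hdle, hdper, hdmin⟩ := dOf_spec (l := l) hin
  by_cases hrep : repB n i = true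
  · rw [if_pos hrep]
    unfold bStep
    rw [bWalk_rep hin hrep]
    dsimp only
    have hlen : (orbitL n (kOf n i) i).length = kOf n i := by simp [orbitL]
    rw [hlen]
    have hcyc : ∀ q, q < kOf n i →
        ((orbitL n (kOf n i) i).map (fun p => l.getD p 'a')).getD q 'a'
          = l.getD ((bSrc n)^[q] i) 'a' := by
      intro q hq
      unfold orbitL
      rw [List.map_map]
      exact PySem.List.getD_map_range _ _ _ _ hq
    have hfind : (List.range' 1 (kOf n i)).find? (fun d =>
        kOf n i % d == 0 && (List.range (kOf n i)).all (fun p =>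
          ((orbitL n (kOf n i) i).map (fun p => l.getD p 'a')).getD ((p + d) % kOf n i) 'a'
            == ((orbitL n (kOf n i) i).map (fun p => l.getD p 'a')).getD p 'a'))
        = some (dOf l n i) := by
      refine find?_range'_eq _ 1 (dOf l n i) (kOf n i) (by omega) (by omega) ?_ ?_
      · rw [Bool.and_eq_true]
        constructor
        · simpa using Nat.mod_eq_zero_of_dvd (dOf_dvd hin (isPer_k hin))
        · rw [List.all_eq_true]
          intro x hx
          have hxk := List.mem_range.mp hx
          rw [hcyc _ (Nat.mod_lt _ hkpos), hcyc _ hxk]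
          simp only [beq_iff_eq]
          have hb := (isPerB_iff hin (dOf l n i)).mpr hdper
          rw [isPerB, decide_eq_true_eq] at hb
          exact hb x hxk
      · intro jj hj1 hj2
        refine eq_false_of_ne_true ?_
        intro htrue
        rw [Bool.and_eq_true, List.all_eq_true] at htrue
        obtain ⟨-, hall⟩ := htrue
        have hperj : isPer l n i jj := by
          rw [← isPerB_iff hin jj, isPerB, decide_eq_true_eq]
          intro p hp
          have hx := hall p (List.mem_range.mpr hp)
          rw [hcyc _ (Nat.mod_lt _ hkpos), hcyc _ hp] at hx
          simpa using hx
        exact hdmin jj (by omega) hj2 hperj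
    rw [hfind]
    simp only [Option.getD_some]
    rw [bGcd_eq_gcd]
    rfl
  · rw [if_neg hrep]
    unfold bStep
    rw [bWalk_notrep hin (eq_false_of_ne_true hrep)]

theorem process_alt_eq (inp : String) :
    process_alt inp = (gFold inp.toList inp.toList.length : Int) := by
  simp only [process_alt]
  have : (List.range inp.toList.length).foldl (bStep inp.toList inp.toList.length) 1
      = gFold inp.toList inp.toList.length := by
    unfold gFold
    refine PySem.List.foldl_congr_mem _ _ _ _ ?_
    intro acc x hx
    exact bStep_eq acc x (List.mem_range.mp hx)
  rw [this]

theorem process_eq (inp : String) :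
    process inp = (gFold inp.toList inp.toList.length : Int) := by
  simp only [process]
  have hG := gFold_pos inp.toList inp.toList.length
  have hP : stepP^[gFold inp.toList inp.toList.length] inp.toList = inp.toList :=
    (stepP_iterate_eq_iff _ _).mpr (PCond_gFold _ _)
  have hmin : ∀ t, 0 < t → t < gFold inp.toList inp.toList.length → stepP^[t] inp.toList ≠ inp.toList := by
    intro t h1 h2 hcon
    have hd := gFold_min ((stepP_iterate_eq_iff _ t).mp hcon)
    have := Nat.le_of_dvd h1 hd
    omega
  have hfac : gFold inp.toList inp.toList.length ≤ Nat.factorial inp.toList.length :=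
    Nat.le_of_dvd (Nat.factorial_pos _) (gFold_dvd_factorial _ _)
  have := aLoop_eq hP hmin (Nat.factorial inp.toList.length + 1) 1 (by omega) (by omega) (by omega)
  simpa using this

-- ===== VERDICT (by name: the statement is the Claim_ definition above) =====
theorem process_spec : Claim_equal_process := by
  intro inp _
  unfold Spec_process
  rw [process_eq, process_alt_eq]
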